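-- pv_equiv track=rewrite | github.com/mohanevs/Intelligent-Lift-Management | model/algo.py | greedy_lift_order
-- ===== SOURCE A (Python) =====
-- def greedy_lift_order(scores, capacity=1):
--     # Assume 1 person per floor (extendable later)
--     people_per_floor = {floor: 1 for floor in scores}
--
--     # Sort by score DESC, then by floor ASC (tie-breaker)
--     sorted_floors = sorted(scores.keys(), key=lambda x: (-scores[x], x))
--
--     selected_order = []
--     current_load = 0
--
--     for floor in sorted_floors:
--         people = people_per_floor[floor]
--
--         if current_load + people <= capacity:
--             selected_order.append(floor)
--             current_load += people
--
--     return selected_order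
-- ===== SOURCE B (Python) =====
-- def greedy_lift_order(scores, capacity=1):
--     # Same sort order as A; each floor costs 1, so the greedy loop picks
--     # exactly the first max(0, capacity) floors: return that prefix directly.
--     order = sorted(scores.keys(), key=lambda x: (-scores[x], x))
--     return order[:max(0, capacity)]
-- ===== Notes on version B (the rewrite author's own statement) =====
-- stated objective: simpler
-- what changed: Replaced A's accumulate-and-test greedy loop and its people_per_floor dict (every floor costs 1) by directly returning the first max(0, capacity) floors of the same sorted list.
import Mathlib
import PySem

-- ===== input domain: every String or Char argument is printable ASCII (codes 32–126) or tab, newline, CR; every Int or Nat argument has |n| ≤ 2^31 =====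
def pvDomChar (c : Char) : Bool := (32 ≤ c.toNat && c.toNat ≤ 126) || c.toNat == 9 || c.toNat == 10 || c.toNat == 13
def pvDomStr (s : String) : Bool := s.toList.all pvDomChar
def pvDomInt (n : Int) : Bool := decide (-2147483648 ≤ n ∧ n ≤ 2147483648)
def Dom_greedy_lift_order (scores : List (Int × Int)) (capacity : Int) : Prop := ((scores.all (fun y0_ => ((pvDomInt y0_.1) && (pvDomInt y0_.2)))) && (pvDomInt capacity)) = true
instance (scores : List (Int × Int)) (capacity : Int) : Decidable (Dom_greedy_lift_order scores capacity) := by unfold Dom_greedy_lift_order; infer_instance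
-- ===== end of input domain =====

-- B drops A's accumulate-and-test loop and people_per_floor dict: each floor costs 1,
-- so the greedy selection is exactly the first max(0, capacity) floors of the sorted list (simpler).

-- ===== PORT A =====
def greedy_lift_order (scores : List (Int × Int)) (capacity : Int) : List Int :=
  let d := PySem.Dict.ofList scores
  -- people_per_floor = {floor: 1 for floor in scores}
  let people : PySem.Dict Int Int :=
    d.keys.foldl (fun pd floor => pd.insert floor 1) PySem.Dict.empty
  -- sorted(scores.keys(), key=lambda x: (-scores[x], x)); scores[x] is total here (x is a key)
  let sortedFloors := PySem.List.sorted2 d.keys (fun x => -(d.getD x 0)) (fun x => x)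
  -- the loop: selected_order / current_load; people_per_floor[floor] is total (floor is a key)
  let st := sortedFloors.foldl (fun (st : List Int × Int) floor =>
      let p := people.getD floor 0
      if st.2 + p ≤ capacity then (st.1 ++ [floor], st.2 + p) else st) ([], 0)
  st.1

-- ===== PORT B =====
def greedy_lift_order_alt (scores : List (Int × Int)) (capacity : Int) : List Int :=
  let d := PySem.Dict.ofList scores
  let order := PySem.List.sorted2 d.keys (fun x => -(d.getD x 0)) (fun x => x)
  -- order[:max(0, capacity)] : a slice with a nonnegative bound is a take
  order.take (max 0 capacity).toNat

-- ===== PRECONDITION & SPEC =====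
def Spec_greedy_lift_order (scores : List (Int × Int)) (capacity : Int) (out : List Int) : Prop := out = greedy_lift_order_alt scores capacity
instance (scores : List (Int × Int)) (capacity : Int) (out : List Int) : Decidable (Spec_greedy_lift_order scores capacity out) := by unfold Spec_greedy_lift_order; infer_instance

-- ===== CLAIM (what is proved, stated in full; the proofs are below) =====
def Claim_equal_greedy_lift_order : Prop := ∀ (scores : List (Int × Int)) (capacity : Int), Dom_greedy_lift_order scores capacity → Spec_greedy_lift_order scores capacity (greedy_lift_order scores capacity)

-- ===== LEMMAS AND PROOFS =====

-- the people_per_floor dict maps every inserted floor to 1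
lemma getD_foldl_insert_one (l : List Int) (d : PySem.Dict Int Int) (f : Int)
    (h : f ∈ l ∨ d.getD f 0 = 1) :
    (l.foldl (fun pd floor => pd.insert floor 1) d).getD f 0 = 1 := by
  induction l generalizing d with
  | nil => simpa using h
  | cons x l ih =>
    simp only [List.foldl_cons]
    apply ih
    rcases h with h | h
    · rcases List.mem_cons.mp h with rfl | h
      · by_cases hx : f ∈ l
        · exact Or.inl hx
        · exact Or.inr (by rw [PySem.Dict.getD_insert]; simp)
      · exact Or.inl h
    · by_cases hx : f = x
      · exact Or.inr (by rw [PySem.Dict.getD_insert]; simp [hx])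
      · exact Or.inr (by rw [PySem.Dict.getD_insert, if_neg hx]; exact h)

-- A's greedy fold over unit weights collects the prefix of length (cap − load)⁺
lemma foldl_select_eq_take (p : Int → Int) (cap : Int) (l : List Int) (acc : List Int) (load : Int)
    (hp : ∀ f ∈ l, p f = 1) :
    (l.foldl (fun (st : List Int × Int) floor =>
        let q := p floor
        if st.2 + q ≤ cap then (st.1 ++ [floor], st.2 + q) else st) (acc, load)).1
      = acc ++ l.take (max 0 (cap - load)).toNat := by
  induction l generalizing acc load with
  | nil => simp
  | cons x l ih =>
    have hx : p x = 1 := hp x (List.mem_cons_self ..)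
    simp only [List.foldl_cons, hx]
    by_cases hc : load + 1 ≤ cap
    · rw [if_pos hc, ih _ _ (fun f hf => hp f (List.mem_cons_of_mem _ hf))]
      have h1 : (max 0 (cap - load)).toNat = (max 0 (cap - (load + 1))).toNat + 1 := by omega
      rw [h1, List.take_succ_cons, List.append_assoc]
      rfl
    · rw [if_neg hc, ih _ _ (fun f hf => hp f (List.mem_cons_of_mem _ hf))]
      have h0 : (max 0 (cap - load)).toNat = 0 := by omega
      rw [h0]; simp

-- ===== VERDICT (by name: the statement is the Claim_ definition above) =====
theorem greedy_lift_order_spec : Claim_equal_greedy_lift_order := by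
  intro scores capacity _
  unfold Spec_greedy_lift_order greedy_lift_order greedy_lift_order_alt
  simp only
  rw [foldl_select_eq_take]
  · simp [max_comm]
  · intro f hf
    exact getD_foldl_insert_one _ _ _ (Or.inl ((PySem.List.sorted2_perm ..).mem_iff.mp hf))
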